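-- pv_equiv track=rewrite | github.com/racai-ai/Rodna | rodna/tokenizer.py | word_is_spec_caps
-- ===== SOURCE A (Python) =====
-- import unicodedata as uc
--
-- def word_is_spec_caps(word: str) -> bool:
--     """Checks if word is of type ABCD or AbCd. Return True
--     if it is, False if it's not."""
--
--     pc = None
--     allup = True
--     mixed = False
--
--     for i in range(len(word)):
--         c = word[i]
--
--         if not uc.category(c).startswith('L'):
--             return False
--         # end if
--
--         if uc.category(c) != 'Lu':
--             allup = False
--         elif pc is not None and uc.category(pc) == 'Ll':
--             mixed = True
--         # end if
--
--         pc = c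
--     # end for
--
--     return allup or mixed
-- ===== SOURCE B (Python) =====
-- import unicodedata as uc
--
-- # Table-driven DFA: states 1=all-caps-so-far, 2=prev char lowercase (no mixing yet),
-- # 3=non-Lu-letter seen, prev not lowercase, 4=mixed pattern found, 0=dead (non-letter).
-- # Accepting states: 1 and 4.
-- _TABLE = {
--     (1, 'U'): 1, (1, 'D'): 2, (1, 'O'): 3,
--     (2, 'U'): 4, (2, 'D'): 2, (2, 'O'): 3,
--     (3, 'U'): 3, (3, 'D'): 2, (3, 'O'): 3,
--     (4, 'U'): 4, (4, 'D'): 4, (4, 'O'): 4,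
-- }
--
-- def _cls(c):
--     cat = uc.category(c)
--     if cat == 'Lu':
--         return 'U'
--     if cat == 'Ll':
--         return 'D'
--     if cat.startswith('L'):
--         return 'O'
--     return 'X'
--
-- def word_is_spec_caps(word: str) -> bool:
--     state = 1
--     for c in word:
--         state = _TABLE.get((state, _cls(c)), 0)
--         if state == 0:
--             return False
--     return state in (1, 4)
-- ===== Notes on version B (the rewrite author's own statement) =====
-- stated objective: alternative
-- what changed: Replaces A's ad-hoc stateful pass (previous-char register plus allup/mixed boolean flags mutated in flight) with a table-driven finite automaton: characters are mapped to classes (Lu/Ll/other-letter/non-letter) and a 5-state transition table is folded over the word, accepting in the all-caps or mixed-found states.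
import Mathlib
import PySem

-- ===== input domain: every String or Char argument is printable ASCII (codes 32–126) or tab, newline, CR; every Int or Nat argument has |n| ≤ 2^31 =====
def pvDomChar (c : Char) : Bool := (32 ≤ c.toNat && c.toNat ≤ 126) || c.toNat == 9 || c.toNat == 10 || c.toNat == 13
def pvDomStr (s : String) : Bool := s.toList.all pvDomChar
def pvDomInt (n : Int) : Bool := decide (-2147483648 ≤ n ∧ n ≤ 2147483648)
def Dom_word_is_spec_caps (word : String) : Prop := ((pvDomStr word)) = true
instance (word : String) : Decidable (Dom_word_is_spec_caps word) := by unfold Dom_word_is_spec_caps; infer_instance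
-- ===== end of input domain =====

-- B replaces A's ad-hoc stateful pass (previous-char register, allup/mixed flags) with a
-- table-driven DFA over character classes (objective: alternative, same cost).

-- unicodedata.category, exact on the printable-ASCII domain for the tests the programs
-- make (startswith 'L', = 'Lu', = 'Ll'): ASCII letters are 'Lu'/'Ll'; no other printable-ASCII
-- or tab/newline/CR character has a category starting with 'L' ("Xx" stands for all of those).
def ucCategory (c : Char) : String :=
  if 'A' ≤ c ∧ c ≤ 'Z' then "Lu"
  else if 'a' ≤ c ∧ c ≤ 'z' then "Ll"
  else "Xx"

-- ===== PORT A =====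
-- the for-loop over word's characters, state (pc, allup, mixed)
def wiscLoop : List Char → Option Char → Bool → Bool → Bool
  | [], _, allup, mixed => allup || mixed
  | c :: rest, pc, allup, mixed =>
    if ¬ (PySem.Str.startswith (ucCategory c) "L") then false
    else if ucCategory c ≠ "Lu" then wiscLoop rest (some c) false mixed
    else
      match pc with
      | some p => if ucCategory p = "Ll" then wiscLoop rest (some c) allup true
                  else wiscLoop rest (some c) allup mixed
      | none => wiscLoop rest (some c) allup mixed

def word_is_spec_caps (word : String) : Bool :=
  wiscLoop word.toList none true false

-- ===== PORT B =====
-- the module-level _TABLE dict of Source B (tuple keys → next state)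
def wiscTable : PySem.Dict (Int × String) Int :=
  PySem.Dict.ofList
    [((1, "U"), 1), ((1, "D"), 2), ((1, "O"), 3),
     ((2, "U"), 4), ((2, "D"), 2), ((2, "O"), 3),
     ((3, "U"), 3), ((3, "D"), 2), ((3, "O"), 3),
     ((4, "U"), 4), ((4, "D"), 4), ((4, "O"), 4)]

-- Source B's _cls
def wiscCls (c : Char) : String :=
  if ucCategory c = "Lu" then "U"
  else if ucCategory c = "Ll" then "D"
  else if PySem.Str.startswith (ucCategory c) "L" then "O"
  else "X"

-- Source B's for-loop: state := TABLE.get((state, cls c), 0); dead state 0 returns False early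
def wiscDfa : List Char → Int → Bool
  | [], state => state == 1 || state == 4
  | c :: rest, state =>
    let st := wiscTable.getD (state, wiscCls c) 0
    if st == 0 then false else wiscDfa rest st

def word_is_spec_caps_alt (word : String) : Bool :=
  wiscDfa word.toList 1

-- ===== PRECONDITION & SPEC =====
def Spec_word_is_spec_caps (word : String) (out : Bool) : Prop := out = word_is_spec_caps_alt word
instance (word : String) (out : Bool) : Decidable (Spec_word_is_spec_caps word out) := by unfold Spec_word_is_spec_caps; infer_instance

-- ===== CLAIM =====
def Claim_equal_word_is_spec_caps : Prop := ∀ (word : String), Dom_word_is_spec_caps word → Spec_word_is_spec_caps word (word_is_spec_caps word)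

-- ===== LEMMAS AND PROOFS =====

def isUp (c : Char) : Bool := decide ('A' ≤ c ∧ c ≤ 'Z')
def isLo (c : Char) : Bool := decide ('a' ≤ c ∧ c ≤ 'z')

def pcLo : Option Char → Bool
  | none => false
  | some p => isLo p

lemma upLow_disjoint {c : Char} (h1 : 'A' ≤ c ∧ c ≤ 'Z') (h2 : 'a' ≤ c ∧ c ≤ 'z') : False :=
  absurd (lt_of_le_of_lt h1.2 (show ('Z' : Char) < 'a' from by decide)) (not_lt.mpr h2.1)

lemma cat_up {c : Char} (h : isUp c = true) : ucCategory c = "Lu" := by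
  unfold isUp at h; unfold ucCategory; rw [if_pos (of_decide_eq_true h)]

lemma up_not_lo {c : Char} (h : isUp c = true) : isLo c = false := by
  unfold isUp at h; unfold isLo
  exact decide_eq_false (fun h2 => upLow_disjoint (of_decide_eq_true h) h2)

lemma cat_lo {c : Char} (h : isLo c = true) : ucCategory c = "Ll" := by
  unfold isLo at h; unfold ucCategory
  rw [if_neg (fun h2 => upLow_disjoint h2 (of_decide_eq_true h)), if_pos (of_decide_eq_true h)]

lemma cat_other {c : Char} (hu : isUp c = false) (hl : isLo c = false) : ucCategory c = "Xx" := by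
  unfold isUp at hu; unfold isLo at hl; unfold ucCategory
  rw [if_neg (of_decide_eq_false hu), if_neg (of_decide_eq_false hl)]

lemma cat_ne_Ll {p : Char} (h : isLo p = false) : ucCategory p ≠ "Ll" := by
  by_cases hu : isUp p = true
  · rw [cat_up hu]; decide
  · rw [cat_other (by simpa using hu) h]; decide

lemma cls_up {c : Char} (h : isUp c = true) : wiscCls c = "U" := by
  unfold wiscCls; rw [cat_up h]; decide

lemma cls_lo {c : Char} (h : isLo c = true) : wiscCls c = "D" := by
  unfold wiscCls; rw [cat_lo h]; decide

lemma cls_other {c : Char} (hu : isUp c = false) (hl : isLo c = false) : wiscCls c = "X" := by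
  unfold wiscCls; rw [cat_other hu hl]; decide

-- one-step unrollings of A's loop
lemma loop_cons_X {c : Char} {r : List Char} {pc : Option Char} {allup mixed : Bool}
    (hc : ucCategory c = "Xx") : wiscLoop (c :: r) pc allup mixed = false := by
  simp only [wiscLoop, hc]; rw [if_pos (by decide)]

lemma loop_cons_D {c : Char} {r : List Char} {pc : Option Char} {allup mixed : Bool}
    (hc : ucCategory c = "Ll") : wiscLoop (c :: r) pc allup mixed = wiscLoop r (some c) false mixed := by
  simp only [wiscLoop, hc]; rw [if_neg (by decide), if_pos (by decide)]

lemma loop_cons_U_none {c : Char} {r : List Char} {allup mixed : Bool}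
    (hc : ucCategory c = "Lu") : wiscLoop (c :: r) none allup mixed = wiscLoop r (some c) allup mixed := by
  simp only [wiscLoop, hc]; rw [if_neg (by decide), if_neg (by decide)]

lemma loop_cons_U_lo {c p : Char} {r : List Char} {allup mixed : Bool}
    (hc : ucCategory c = "Lu") (hp : ucCategory p = "Ll") :
    wiscLoop (c :: r) (some p) allup mixed = wiscLoop r (some c) allup true := by
  simp only [wiscLoop, hc]; rw [if_neg (by decide), if_neg (by decide)]
  exact if_pos hp

lemma loop_cons_U_notlo {c p : Char} {r : List Char} {allup mixed : Bool}
    (hc : ucCategory c = "Lu") (hp : ucCategory p ≠ "Ll") :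
    wiscLoop (c :: r) (some p) allup mixed = wiscLoop r (some c) allup mixed := by
  simp only [wiscLoop, hc]; rw [if_neg (by decide), if_neg (by decide)]
  exact if_neg hp

-- one-step unrolling of B's DFA, with the table looked up
lemma dfa_cons {c : Char} {r : List Char} {s s' : Int} {k : String}
    (hk : wiscCls c = k) (hT : wiscTable.getD (s, k) 0 = s') :
    wiscDfa (c :: r) s = if s' == 0 then false else wiscDfa r s' := by
  simp only [wiscDfa, hk, hT]

-- the simulation: A's loop state (pc, allup, mixed) corresponds to B's DFA state
lemma sim : ∀ (cs : List Char),
    (∀ pc, pcLo pc = false → wiscLoop cs pc true false = wiscDfa cs 1) ∧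
    (∀ pc, pcLo pc = true → wiscLoop cs pc false false = wiscDfa cs 2) ∧
    (∀ pc, pcLo pc = false → wiscLoop cs pc false false = wiscDfa cs 3) ∧
    (∀ pc allup, wiscLoop cs pc allup true = wiscDfa cs 4) := by
  intro cs
  induction cs with
  | nil =>
    refine ⟨fun pc _ => rfl, fun pc _ => rfl, fun pc _ => rfl,
            fun pc allup => by cases allup <;> rfl⟩
  | cons c r ih =>
    obtain ⟨ih1, ih2, ih3, ih4⟩ := ih
    by_cases hu : isUp c = true
    · have hlo := up_not_lo hu
      have hLu := cat_up hu
      have hcls := cls_up hu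
      refine ⟨?_, ?_, ?_, ?_⟩
      · intro pc h
        rw [dfa_cons hcls (show wiscTable.getD (1, "U") 0 = 1 from by decide),
            if_neg (by decide)]
        cases pc with
        | none => rw [loop_cons_U_none hLu]; exact ih1 (some c) (by simp [pcLo, hlo])
        | some p =>
          simp [pcLo] at h
          rw [loop_cons_U_notlo hLu (cat_ne_Ll h)]
          exact ih1 (some c) (by simp [pcLo, hlo])
      · intro pc h
        rw [dfa_cons hcls (show wiscTable.getD (2, "U") 0 = 4 from by decide),
            if_neg (by decide)]
        cases pc with
        | none => simp [pcLo] at h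
        | some p =>
          simp [pcLo] at h
          rw [loop_cons_U_lo hLu (cat_lo h)]
          exact ih4 (some c) false
      · intro pc h
        rw [dfa_cons hcls (show wiscTable.getD (3, "U") 0 = 3 from by decide),
            if_neg (by decide)]
        cases pc with
        | none => rw [loop_cons_U_none hLu]; exact ih3 (some c) (by simp [pcLo, hlo])
        | some p =>
          simp [pcLo] at h
          rw [loop_cons_U_notlo hLu (cat_ne_Ll h)]
          exact ih3 (some c) (by simp [pcLo, hlo])
      · intro pc allup
        rw [dfa_cons hcls (show wiscTable.getD (4, "U") 0 = 4 from by decide),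
            if_neg (by decide)]
        cases pc with
        | none => rw [loop_cons_U_none hLu]; exact ih4 (some c) allup
        | some p =>
          by_cases hp : ucCategory p = "Ll"
          · rw [loop_cons_U_lo hLu hp]; exact ih4 (some c) allup
          · rw [loop_cons_U_notlo hLu hp]; exact ih4 (some c) allup
    · by_cases hl : isLo c = true
      · have hLl := cat_lo hl
        have hcls := cls_lo hl
        have hpc : pcLo (some c) = true := by simp [pcLo, hl]
        refine ⟨?_, ?_, ?_, ?_⟩
        · intro pc h
          rw [dfa_cons hcls (show wiscTable.getD (1, "D") 0 = 2 from by decide),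
              if_neg (by decide), loop_cons_D hLl]
          exact ih2 (some c) hpc
        · intro pc h
          rw [dfa_cons hcls (show wiscTable.getD (2, "D") 0 = 2 from by decide),
              if_neg (by decide), loop_cons_D hLl]
          exact ih2 (some c) hpc
        · intro pc h
          rw [dfa_cons hcls (show wiscTable.getD (3, "D") 0 = 2 from by decide),
              if_neg (by decide), loop_cons_D hLl]
          exact ih2 (some c) hpc
        · intro pc allup
          rw [dfa_cons hcls (show wiscTable.getD (4, "D") 0 = 4 from by decide),
              if_neg (by decide), loop_cons_D hLl]
          exact ih4 (some c) false
      · have hup : isUp c = false := by simpa using hu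
        have hlo : isLo c = false := by simpa using hl
        have hXx := cat_other hup hlo
        have hcls := cls_other hup hlo
        refine ⟨?_, ?_, ?_, ?_⟩
        · intro pc h
          rw [dfa_cons hcls (show wiscTable.getD (1, "X") 0 = 0 from by decide),
              if_pos (by decide), loop_cons_X hXx]
        · intro pc h
          rw [dfa_cons hcls (show wiscTable.getD (2, "X") 0 = 0 from by decide),
              if_pos (by decide), loop_cons_X hXx]
        · intro pc h
          rw [dfa_cons hcls (show wiscTable.getD (3, "X") 0 = 0 from by decide),
              if_pos (by decide), loop_cons_X hXx]
        · intro pc allup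
          rw [dfa_cons hcls (show wiscTable.getD (4, "X") 0 = 0 from by decide),
              if_pos (by decide), loop_cons_X hXx]

-- ===== VERDICT =====
theorem word_is_spec_caps_spec : Claim_equal_word_is_spec_caps := by
  intro word _
  unfold Spec_word_is_spec_caps word_is_spec_caps word_is_spec_caps_alt
  exact (sim word.toList).1 none rfl
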